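-- pv_equiv track=rewrite | github.com/jams2234/seo-manager | seo_analyzer/services/git_deployer/base.py | _group_fixes_by_field
-- ===== SOURCE A (Python) =====
-- def _group_fixes_by_field(fixes: list) -> dict:
--     """
--     Helper method to group fixes by field type
--
--     Args:
--         fixes: List of fix dictionaries
--
--     Returns:
--         Dictionary with 'title' and 'description' fixes
--     """
--     result = {
--         'title': None,
--         'description': None,
--     }
--
--     for fix in fixes:
--         field = fix.get('field', '')
--         if field == 'title' and not result['title']:
--             result['title'] = fix
--         elif field == 'description' and not result['description']:
--             result['description'] = fix
--
--     return result
-- ===== SOURCE B (Python) =====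
-- def _group_fixes_by_field(fixes: list) -> dict:
--     """Pick the first fix for each field via two short-circuiting scans."""
--     return {
--         'title': next((f for f in fixes if f.get('field', '') == 'title'), None),
--         'description': next((f for f in fixes if f.get('field', '') == 'description'), None),
--     }
-- ===== Notes on version B (the rewrite author's own statement) =====
-- stated objective: idiomatic
-- what changed: Replaces the single loop maintaining two truthiness-guarded accumulators by one independent first-match scan per field (next over a filtered generator), each stopping at its first hit; safe because any fix matching a field is a non-empty dict.
import Mathlib
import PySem

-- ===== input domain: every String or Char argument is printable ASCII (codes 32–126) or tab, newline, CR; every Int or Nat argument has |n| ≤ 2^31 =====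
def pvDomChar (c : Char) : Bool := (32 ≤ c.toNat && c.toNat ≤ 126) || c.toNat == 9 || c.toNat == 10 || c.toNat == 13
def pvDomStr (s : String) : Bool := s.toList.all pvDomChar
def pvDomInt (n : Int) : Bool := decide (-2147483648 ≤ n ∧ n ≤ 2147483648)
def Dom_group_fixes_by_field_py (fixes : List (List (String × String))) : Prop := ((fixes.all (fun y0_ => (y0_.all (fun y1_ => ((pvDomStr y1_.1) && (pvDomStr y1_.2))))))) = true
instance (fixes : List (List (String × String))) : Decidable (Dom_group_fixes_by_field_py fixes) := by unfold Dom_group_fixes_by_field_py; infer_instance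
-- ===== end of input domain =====

-- B replaces A's single loop with two truthiness-guarded accumulators by one
-- independent first-match scan per field (idiomatic; same O(n) cost).


-- ===== PORT A =====
-- fix.get('field', '') : shared by both Pythons
def pvGetField (f : List (String × String)) : String :=
  (PySem.Dict.mk f).getD "field" ""

-- 'not result[k]' on an Optional[dict] : None and {} are falsy
def pvNotTruthy (cur : Option (List (String × String))) : Bool :=
  cur.getD [] == []

-- the for-loop of A over the state (result['title'], result['description'])
def pvLoopA : List (List (String × String)) → Option (List (String × String)) →
    Option (List (String × String)) →
    Option (List (String × String)) × Option (List (String × String))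
  | [], t, d => (t, d)
  | f :: fs, t, d =>
    let field := pvGetField f
    if field == "title" && pvNotTruthy t then pvLoopA fs (some f) d
    else if field == "description" && pvNotTruthy d then pvLoopA fs t (some f)
    else pvLoopA fs t d

def group_fixes_by_field_py (fixes : List (List (String × String))) : List (String × Option (List (String × String))) :=
  let r := pvLoopA fixes none none
  [("title", r.1), ("description", r.2)]

-- ===== PORT B =====
def group_fixes_by_field_py_alt (fixes : List (List (String × String))) : List (String × Option (List (String × String))) :=
  [("title", fixes.find? (fun f => pvGetField f == "title")),
   ("description", fixes.find? (fun f => pvGetField f == "description"))]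

-- ===== PRECONDITION & SPEC =====
def Spec_group_fixes_by_field_py (fixes : List (List (String × String))) (out : List (String × Option (List (String × String)))) : Prop := out = group_fixes_by_field_py_alt fixes
instance (fixes : List (List (String × String))) (out : List (String × Option (List (String × String)))) : Decidable (Spec_group_fixes_by_field_py fixes out) := by unfold Spec_group_fixes_by_field_py; infer_instance

-- ===== CLAIM (what is proved, stated in full; the proofs are below) =====
def Claim_equal_group_fixes_by_field_py : Prop := ∀ (fixes : List (List (String × String))), Dom_group_fixes_by_field_py fixes → Spec_group_fixes_by_field_py fixes (group_fixes_by_field_py fixes)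

-- ===== LEMMAS AND PROOFS =====

-- how one accumulator of A's loop relates to the first match of the rest of the list
def pvStep (cur : Option (List (String × String))) (found : Option (List (String × String))) :
    Option (List (String × String)) :=
  if pvNotTruthy cur then found.or cur else cur

lemma pvGetField_ne_empty {f : List (String × String)} {s : String}
    (h : pvGetField f = s) (hs : s ≠ "") : f ≠ [] := by
  intro hf
  subst hf
  have h0 : pvGetField ([] : List (String × String)) = "" := by decide
  exact hs ((h0.symm.trans h).symm)

lemma pvNotTruthy_some_matching {f : List (String × String)} {s : String}
    (h : pvGetField f = s) (hs : s ≠ "") : pvNotTruthy (some f) = false := by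
  have hne := pvGetField_ne_empty h hs
  cases f with
  | nil => exact absurd rfl hne
  | cons a l => simp [pvNotTruthy]

lemma pvLoopA_eq_step : ∀ (fs : List (List (String × String)))
    (t d : Option (List (String × String))),
    pvLoopA fs t d =
      (pvStep t (fs.find? (fun f => pvGetField f == "title")),
       pvStep d (fs.find? (fun f => pvGetField f == "description"))) := by
  intro fs
  induction fs with
  | nil =>
    intro t d
    simp [pvLoopA, pvStep, Option.none_or, ite_self]
  | cons f fs ih =>
    intro t d
    by_cases hT : pvGetField f = "title"
    · have hD : ¬ pvGetField f = "description" := by rw [hT]; decide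
      have hfT : pvNotTruthy (some f) = false :=
        pvNotTruthy_some_matching hT (by decide)
      by_cases ht : pvNotTruthy t = true
      · simp [pvLoopA, hT, hD, ht, ih, List.find?, pvStep, hfT, Option.or]
      · simp [pvLoopA, hT, hD, ht, ih, List.find?, pvStep]
    · by_cases hD : pvGetField f = "description"
      · have hfD : pvNotTruthy (some f) = false :=
          pvNotTruthy_some_matching hD (by decide)
        by_cases hd : pvNotTruthy d = true
        · simp [pvLoopA, hD, hd, ih, List.find?, pvStep, hfD, Option.or]
        · simp [pvLoopA, hD, hd, ih, List.find?, pvStep]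
      · have hT' : (pvGetField f == "title") = false := by simpa using hT
        have hD' : (pvGetField f == "description") = false := by simpa using hD
        simp [pvLoopA, hT', hD', ih, List.find?]

-- ===== VERDICT (by name: the statement is the Claim_ definition above) =====
theorem group_fixes_by_field_py_spec : Claim_equal_group_fixes_by_field_py := by
  intro fixes _
  unfold Spec_group_fixes_by_field_py group_fixes_by_field_py group_fixes_by_field_py_alt
  rw [pvLoopA_eq_step]
  simp [pvStep, pvNotTruthy, Option.or_none]
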